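-- pv_equiv track=rewrite | github.com/taddeus/advent-of-code | 2017/20_particles.py | closest_after_steps
-- ===== SOURCE A (Python) =====
-- def closest_after_steps(p, v, a, steps):
--     p = p.copy()
--     v = v.copy()
--     for step in range(steps):
--         for i in range(len(p)):
--             v[i] += a[i]
--             p[i] += v[i]
--     p = list(map(abs, p))
--     d = [sum(p[i:i + 3]) for i in range(0, len(p), 3)]
--     return d.index(min(d))
-- ===== SOURCE B (Python) =====
-- def closest_after_steps(p, v, a, steps):
--     # Closed form: after t steps v = v0 + a*t, p = p0 + v0*t + a*t*(t+1)//2.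
--     t = steps if steps > 0 else 0
--     if t:
--         q = [pi + vi * t + ai * t * (t + 1) // 2 for pi, vi, ai in zip(p, v, a)]
--     else:
--         q = list(p)
--     best = None
--     best_idx = 0
--     idx = 0
--     while q:
--         s = sum(abs(x) for x in q[:3])
--         if best is None or s < best:
--             best, best_idx = s, idx
--         q = q[3:]
--         idx += 1
--     return best_idx
-- ===== Notes on version B (the rewrite author's own statement) =====
-- stated objective: faster
-- what changed: Replaces the step-by-step simulation of all particles over `steps` iterations with the exact integer closed form p0 + v0*t + a*t*(t+1)//2 per coordinate, and replaces building the distance list plus min()/index() with a single running-argmin pass over chunks of 3.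
import Mathlib
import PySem

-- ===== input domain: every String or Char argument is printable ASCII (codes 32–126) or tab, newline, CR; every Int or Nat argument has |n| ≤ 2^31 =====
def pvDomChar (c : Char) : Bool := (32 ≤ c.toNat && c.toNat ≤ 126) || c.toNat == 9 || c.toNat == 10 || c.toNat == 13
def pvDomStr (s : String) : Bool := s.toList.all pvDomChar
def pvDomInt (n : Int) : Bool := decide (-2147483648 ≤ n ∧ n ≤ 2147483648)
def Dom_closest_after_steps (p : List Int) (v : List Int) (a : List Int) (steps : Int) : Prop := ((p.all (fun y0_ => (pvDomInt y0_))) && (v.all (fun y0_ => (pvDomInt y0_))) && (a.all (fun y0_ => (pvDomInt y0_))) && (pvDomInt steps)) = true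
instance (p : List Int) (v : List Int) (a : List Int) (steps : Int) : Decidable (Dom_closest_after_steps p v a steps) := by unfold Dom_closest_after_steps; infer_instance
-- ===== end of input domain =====

-- B replaces A's step-by-step simulation by the exact closed form p0 + v0*t + a*t*(t+1)//2
-- per coordinate and a single running-argmin pass over chunks of 3 (objective: faster).

-- ===== PORT A =====
-- one iteration of the inner `for i in range(len(p))` body (getD 0 is only read in range under Pre_)
def aInner (a : List Int) (pv : List Int × List Int) (i : Nat) : List Int × List Int :=
  let v' := pv.2.set i (pv.2.getD i 0 + a.getD i 0)
  let p' := pv.1.set i (pv.1.getD i 0 + v'.getD i 0)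
  (p', v')

-- one iteration of the outer `for step in range(steps)` body
def aStep (a : List Int) (pv : List Int × List Int) : List Int × List Int :=
  (List.range pv.1.length).foldl (aInner a) pv

def closest_after_steps (p : List Int) (v : List Int) (a : List Int) (steps : Int) : Int :=
  let st := (PySem.List.pyRange 0 steps 1).foldl (fun pv _ => aStep a pv) (p, v)
  let pa := st.1.map (fun x => |x|)
  let d := (PySem.List.pyRange 0 (pa.length : Int) 3).map
    (fun i => (PySem.List.slice pa (some i) (some (i + 3))).sum)
  match PySem.List.min? d (fun y => y) with
  | some m => ((PySem.List.index? d m).getD 0 : Int)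
  | none => 0   -- unreachable under Pre_: Python raises ValueError on empty d

-- ===== PORT B =====
-- the `if best is None or s < best` update of Source B: new (best, best_idx)
def altUpd (s : Int) (idx : Nat) (best : Option Int) (bestIdx : Nat) : Option Int × Nat :=
  match best with
  | none => (some s, idx)
  | some b => if s < b then (some s, idx) else (some b, bestIdx)

-- the `while q:` loop of Source B: sum |.| over q[:3], update best, continue with q[3:]
def altGo : List Int → Nat → Option Int → Nat → Nat
  | [], _, _, bestIdx => bestIdx
  | [x], idx, best, bestIdx => (altUpd (|x|) idx best bestIdx).2
  | [x, y], idx, best, bestIdx => (altUpd (|x| + |y|) idx best bestIdx).2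
  | x :: y :: z :: rest, idx, best, bestIdx =>
    let u := altUpd (|x| + |y| + |z|) idx best bestIdx
    altGo rest (idx + 1) u.1 u.2

def closest_after_steps_alt (p : List Int) (v : List Int) (a : List Int) (steps : Int) : Int :=
  let t : Int := if 0 < steps then steps else 0
  let q : List Int :=
    if t = 0 then p
    else (p.zip (v.zip a)).map
      (fun x => x.1 + x.2.1 * t + PySem.Int.floordiv (x.2.2 * t * (t + 1)) 2)
  (altGo q 0 none 0 : Int)

-- ===== PRECONDITION & SPEC =====
-- Pre_ excludes exactly the inputs where A raises: empty p (ValueError from min([])) and,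
-- when the simulation loop runs (steps > 0), v or a shorter than p (IndexError).
def Pre_closest_after_steps (p : List Int) (v : List Int) (a : List Int) (steps : Int) : Prop :=
  p ≠ [] ∧ (steps ≤ 0 ∨ (p.length ≤ v.length ∧ p.length ≤ a.length))

instance (p : List Int) (v : List Int) (a : List Int) (steps : Int) : Decidable (Pre_closest_after_steps p v a steps) := by unfold Pre_closest_after_steps; infer_instance

def pvWitness_closest_after_steps : List Int × List Int × List Int × Int :=
  ([3, 0, 0, 1, 2, 3], [2, -1, 0, 0, 1, 0], [-1, 0, 0, 1, 0, -1], 4)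

def Spec_closest_after_steps (p : List Int) (v : List Int) (a : List Int) (steps : Int) (out : Int) : Prop := out = closest_after_steps_alt p v a steps
instance (p : List Int) (v : List Int) (a : List Int) (steps : Int) (out : Int) : Decidable (Spec_closest_after_steps p v a steps out) := by unfold Spec_closest_after_steps; infer_instance

-- ===== CLAIM (what is proved, stated in full; the proofs are below) =====
def Claim_equal_closest_after_steps : Prop := ∀ (p : List Int) (v : List Int) (a : List Int) (steps : Int), Dom_closest_after_steps p v a steps → Pre_closest_after_steps p v a steps → Spec_closest_after_steps p v a steps (closest_after_steps p v a steps)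

-- ===== LEMMAS AND PROOFS =====

lemma pv_getD_set (l : List Int) (i k : Nat) (x : Int) :
    (l.set i x).getD k 0 = if i = k ∧ i < l.length then x else l.getD k 0 := by
  by_cases h1 : i = k
  · subst h1
    by_cases h2 : i < l.length
    · simp [List.getD_eq_getElem?_getD, List.getElem?_set, h2]
    · have hn : l[i]? = none := by
        rw [List.getElem?_eq_none_iff]; omega
      simp [List.getD_eq_getElem?_getD, List.getElem?_set, h2, hn]
  · simp [List.getD_eq_getElem?_getD, List.getElem?_set, h1]

-- the inner pass over range' j m updates each index independently
lemma pv_inner_spec (a : List Int) :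
    ∀ (m j : Nat) (P V : List Int), j + m ≤ P.length → P.length ≤ V.length →
      ((List.range' j m).foldl (aInner a) (P, V)).1.length = P.length ∧
      ((List.range' j m).foldl (aInner a) (P, V)).2.length = V.length ∧
      (∀ i : Nat, ((List.range' j m).foldl (aInner a) (P, V)).2.getD i 0 =
        if j ≤ i ∧ i < j + m then V.getD i 0 + a.getD i 0 else V.getD i 0) ∧
      (∀ i : Nat, ((List.range' j m).foldl (aInner a) (P, V)).1.getD i 0 =
        if j ≤ i ∧ i < j + m then P.getD i 0 + V.getD i 0 + a.getD i 0 else P.getD i 0) := by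
  intro m
  induction m with
  | zero =>
    intro j P V hjm hpv
    have h0 : List.range' j 0 = [] := rfl
    rw [h0]
    simp only [List.foldl_nil]
    exact ⟨trivial, trivial, fun i => by rw [if_neg (by omega)], fun i => by rw [if_neg (by omega)]⟩
  | succ m ih =>
    intro j P V hjm hpv
    rw [List.range'_succ]
    simp only [List.foldl_cons]
    have hstep : aInner a (P, V) j =
        (P.set j (P.getD j 0 + (V.getD j 0 + a.getD j 0)), V.set j (V.getD j 0 + a.getD j 0)) := by
      unfold aInner
      simp only
      congr 2
      rw [pv_getD_set, if_pos ⟨rfl, by omega⟩]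
    rw [hstep]
    set P' := P.set j (P.getD j 0 + (V.getD j 0 + a.getD j 0)) with hP'
    set V' := V.set j (V.getD j 0 + a.getD j 0) with hV'
    have hlp : P'.length = P.length := by simp [hP']
    have hlv : V'.length = V.length := by simp [hV']
    obtain ⟨ih1, ih2, ih3, ih4⟩ := ih (j + 1) P' V' (by omega) (by omega)
    refine ⟨by rw [ih1, hlp], by rw [ih2, hlv], ?_, ?_⟩
    · intro i
      by_cases hij : j = i
      · subst hij
        rw [ih3 j, if_neg (by omega : ¬(j + 1 ≤ j ∧ j < j + 1 + m)), hV', pv_getD_set,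
          if_pos (show j = j ∧ j < V.length from ⟨rfl, by omega⟩),
          if_pos (by omega : j ≤ j ∧ j < j + (m + 1))]
      · rw [ih3 i, hV']
        have h2 : ¬(j = i ∧ j < V.length) := fun h => hij h.1
        simp only [pv_getD_set, if_neg h2]
        split_ifs <;> omega
    · intro i
      by_cases hij : j = i
      · subst hij
        rw [ih4 j, if_neg (by omega : ¬(j + 1 ≤ j ∧ j < j + 1 + m)), hP', pv_getD_set,
          if_pos (show j = j ∧ j < P.length from ⟨rfl, by omega⟩),
          if_pos (by omega : j ≤ j ∧ j < j + (m + 1))]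
        ring
      · rw [ih4 i, hP', hV']
        have h1 : ¬(j = i ∧ j < P.length) := fun h => hij h.1
        have h2 : ¬(j = i ∧ j < V.length) := fun h => hij h.1
        simp only [pv_getD_set, if_neg h1, if_neg h2]
        split_ifs <;> omega

-- a fold that ignores the elements is an iterate
lemma pv_foldl_const {α β : Type} (g : α → α) (l : List β) (init : α) :
    l.foldl (fun s _ => g s) init = g^[l.length] init := by
  induction l generalizing init with
  | nil => rfl
  | cons x t ihl => simp [List.foldl_cons, ihl, Function.iterate_succ_apply]

-- triangular numbers, as B's t*(t+1)//2 term accumulates them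
def pvTri : Nat → Int
  | 0 => 0
  | k + 1 => pvTri k + (k + 1)

lemma pv_tri_two (k : Nat) : 2 * pvTri k = (k : Int) * (k + 1) := by
  induction k with
  | zero => simp [pvTri]
  | succ n ihk =>
    simp only [pvTri]
    push_cast
    push_cast at ihk
    nlinarith [ihk]

lemma pv_floordiv_tri (c : Int) (k : Nat) :
    PySem.Int.floordiv (c * k * (k + 1)) 2 = c * pvTri k := by
  have h : c * (k : Int) * ((k : Int) + 1) = c * pvTri k * 2 := by
    calc c * (k : Int) * ((k : Int) + 1) = c * ((k : Int) * ((k : Int) + 1)) := by ring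
    _ = c * (2 * pvTri k) := by rw [← pv_tri_two]
    _ = c * pvTri k * 2 := by ring
  rw [PySem.Int.floordiv_eq_iff_of_pos (by norm_num)]
  constructor <;> linarith [h]

-- closed form of the simulated state after k outer iterations
lemma pv_iterate_spec (p v a : List Int) (hpv : p.length ≤ v.length) :
    ∀ k : Nat,
      ((aStep a)^[k] (p, v)).1.length = p.length ∧
      ((aStep a)^[k] (p, v)).2.length = v.length ∧
      (∀ i : Nat, ((aStep a)^[k] (p, v)).2.getD i 0 =
        if i < p.length then v.getD i 0 + a.getD i 0 * k else v.getD i 0) ∧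
      (∀ i : Nat, ((aStep a)^[k] (p, v)).1.getD i 0 =
        if i < p.length then p.getD i 0 + v.getD i 0 * k + a.getD i 0 * pvTri k else p.getD i 0) := by
  intro k
  induction k with
  | zero =>
    refine ⟨rfl, rfl, ?_, ?_⟩ <;> intro i <;> simp [pvTri]
  | succ k ihk =>
    obtain ⟨ih1, ih2, ih3, ih4⟩ := ihk
    rw [Function.iterate_succ_apply']
    set st := (aStep a)^[k] (p, v) with hstdef
    have hstep : aStep a st =
        (List.range' 0 st.1.length).foldl (aInner a) (st.1, st.2) := by
      unfold aStep
      rw [List.range_eq_range']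
    obtain ⟨g1, g2, g3, g4⟩ := pv_inner_spec a st.1.length 0 st.1 st.2 (by omega) (by omega)
    rw [hstep]
    refine ⟨by rw [g1, ih1], by rw [g2, ih2], ?_, ?_⟩
    · intro i
      rw [g3 i]
      by_cases hc : i < p.length
      · rw [if_pos (show 0 ≤ i ∧ i < 0 + st.1.length by omega)]
        rw [ih3 i, if_pos hc, if_pos hc]
        push_cast
        ring
      · rw [if_neg (show ¬(0 ≤ i ∧ i < 0 + st.1.length) by omega)]
        rw [ih3 i, if_neg hc, if_neg hc]
    · intro i
      rw [g4 i]
      by_cases hc : i < p.length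
      · rw [if_pos (show 0 ≤ i ∧ i < 0 + st.1.length by omega)]
        rw [ih4 i, ih3 i, if_pos hc, if_pos hc, if_pos hc]
        simp only [pvTri]
        push_cast
        ring
      · rw [if_neg (show ¬(0 ≤ i ∧ i < 0 + st.1.length) by omega)]
        rw [ih4 i, if_neg hc, if_neg hc]

-- chunks-of-3 |.|-sums: the list A calls d
def pvChunkS : List Int → List Int
  | [] => []
  | [x] => [|x|]
  | [x, y] => [|x| + |y|]
  | x :: y :: z :: rest => (|x| + |y| + |z|) :: pvChunkS rest

lemma pv_sliceSum_pyRange (xs : List Int) :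
    (PySem.List.pyRange 0 (xs.length : Int) 3).map
      (fun i => (PySem.List.slice xs (some i) (some (i + 3))).sum)
    = (List.range ((xs.length + 2) / 3)).map (fun k => ((xs.drop (3 * k)).take 3).sum) := by
  rw [PySem.List.pyRange_of_pos 0 (xs.length : Int) (by norm_num)]
  by_cases h : xs.length = 0
  · simp [h]
  · have hpos : (0 : Int) < (xs.length : Int) := by exact_mod_cast Nat.pos_of_ne_zero h
    rw [if_pos hpos]
    have hc : (((xs.length : Int) - 0 + 3 - 1) / 3).toNat = (xs.length + 2) / 3 := by omega
    rw [hc, List.map_map]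
    apply List.map_congr_left
    intro k _
    simp only [Function.comp]
    have h1 : (0 : Int) + 3 * (k : Int) = ((3 * k : Nat) : Int) := by push_cast; ring
    have h2 : ((3 * k : Nat) : Int) + 3 = ((3 * k + 3 : Nat) : Int) := by push_cast; ring
    rw [h1, h2, PySem.List.slice_natCast]
    have h3 : 3 * k + 3 - 3 * k = 3 := by omega
    rw [h3]

lemma pv_chunk_eq (xs : List Int) :
    (List.range ((xs.length + 2) / 3)).map
      (fun k => (((xs.map (fun x => |x|)).drop (3 * k)).take 3).sum) = pvChunkS xs := by
  induction xs using pvChunkS.induct with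
  | case1 => simp [pvChunkS]
  | case2 x => simp [pvChunkS, List.range_succ]
  | case3 x y => simp [pvChunkS, List.range_succ]
  | case4 x y z rest ihc =>
    have hcnt : ((x :: y :: z :: rest).length + 2) / 3 = (rest.length + 2) / 3 + 1 := by
      simp only [List.length_cons]
      omega
    rw [hcnt, List.range_succ_eq_map, List.map_cons, List.map_map]
    rw [show pvChunkS (x :: y :: z :: rest) = (|x| + |y| + |z|) :: pvChunkS rest from rfl]
    congr 1
    simp [add_assoc]

lemma pv_chunkS_ne_nil (xs : List Int) (h : xs ≠ []) : pvChunkS xs ≠ [] := by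
  match xs with
  | [] => exact absurd rfl h
  | [x] => simp [pvChunkS]
  | [x, y] => simp [pvChunkS]
  | x :: y :: z :: rest => simp [pvChunkS]

-- the same argmin loop, over the ready-made chunk-sum list
def pvArgGo : List Int → Nat → Option Int → Nat → Nat
  | [], _, _, bi => bi
  | s :: rest, idx, best, bi =>
    let u := altUpd s idx best bi
    pvArgGo rest (idx + 1) u.1 u.2

lemma pv_altGo_eq_argGo : ∀ (q : List Int) (idx : Nat) (best : Option Int) (bi : Nat),
    altGo q idx best bi = pvArgGo (pvChunkS q) idx best bi := by
  intro q
  induction q using pvChunkS.induct with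
  | case1 => intro idx best bi; simp [altGo, pvChunkS, pvArgGo]
  | case2 x => intro idx best bi; simp [altGo, pvChunkS, pvArgGo]
  | case3 x y => intro idx best bi; simp [altGo, pvChunkS, pvArgGo]
  | case4 x y z rest ihc =>
    intro idx best bi
    simp only [altGo, pvChunkS, pvArgGo]
    exact ihc _ _ _

lemma pv_foldl_min_comm (t : List Int) : ∀ (x y : Int),
    List.foldl min (min x y) t = min x (List.foldl min y t) := by
  induction t with
  | nil => intro x y; simp
  | cons z t ihm => intro x y; simp only [List.foldl_cons, min_assoc, ihm]

lemma pv_argGo_some : ∀ (d : List Int) (m : Int),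
    PySem.List.min? d (fun y => y) = some m → ∀ (idx bi : Nat) (b : Int),
    pvArgGo d idx (some b) bi =
      if m < b then idx + (PySem.List.index? d m).getD 0 else bi := by
  intro d
  induction d with
  | nil =>
    intro m hm
    rw [(PySem.List.min?_eq_none_iff _ _).mpr rfl] at hm
    exact absurd hm (by simp)
  | cons x rest ihd =>
    intro m hm idx bi b
    rw [PySem.List.min?_id_cons] at hm
    injection hm with hm
    have hsplit : pvArgGo (x :: rest) idx (some b) bi =
        if x < b then pvArgGo rest (idx + 1) (some x) idx
        else pvArgGo rest (idx + 1) (some b) bi := by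
      by_cases h : x < b <;> simp [pvArgGo, altUpd, h]
    rw [hsplit]
    rcases rest with _ | ⟨y, t⟩
    · simp only [List.foldl_nil] at hm
      subst hm
      rw [PySem.List.index?_cons_self]
      by_cases h : x < b <;> simp [pvArgGo, h]
    · have hmr : PySem.List.min? (y :: t) (fun y => y) = some (List.foldl min y t) :=
        PySem.List.min?_id_cons y t
      set mr := List.foldl min y t with hmrdef
      have hm' : m = min x mr := by
        rw [← hm]
        simp only [List.foldl_cons]
        exact (pv_foldl_min_comm t x y).symm ▸ rfl
      have hmem : mr ∈ y :: t := PySem.List.min?_mem hmr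
      obtain ⟨jr, hjr⟩ := Option.isSome_iff_exists.mp
        ((PySem.List.index?_isSome_iff (y :: t) mr).mpr hmem)
      rw [ihd mr hmr (idx + 1) idx x, ihd mr hmr (idx + 1) bi b]
      by_cases hxm : x ≤ mr
      · rw [hm', min_eq_left hxm, PySem.List.index?_cons_self]
        simp only [hjr, Option.getD_some]
        split_ifs <;> omega
      · have hne : x ≠ mr := by omega
        rw [hm', min_eq_right (by omega : mr ≤ x), PySem.List.index?_cons_of_ne _ hne]
        simp only [hjr, Option.map_some, Option.getD_some]
        split_ifs <;> omega

lemma pv_argGo_top (d : List Int) (hd : d ≠ []) :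
    (match PySem.List.min? d (fun y => y) with
     | some m => ((PySem.List.index? d m).getD 0 : Int)
     | none => 0) = (pvArgGo d 0 none 0 : Int) := by
  rcases d with _ | ⟨x, rest⟩
  · exact absurd rfl hd
  · have hA : (match PySem.List.min? (x :: rest) (fun y => y) with
        | some m => ((PySem.List.index? (x :: rest) m).getD 0 : Int)
        | none => 0)
        = ((PySem.List.index? (x :: rest) (List.foldl min x rest)).getD 0 : Int) := by
      rw [PySem.List.min?_id_cons]
    have hstart : pvArgGo (x :: rest) 0 none 0 = pvArgGo rest 1 (some x) 0 := by
      simp [pvArgGo, altUpd]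
    rw [hA, hstart]
    rcases rest with _ | ⟨y, t⟩
    · simp only [List.foldl_nil, PySem.List.index?_cons_self]
      simp [pvArgGo]
    · have hmr : PySem.List.min? (y :: t) (fun y => y) = some (List.foldl min y t) :=
        PySem.List.min?_id_cons y t
      set mr := List.foldl min y t with hmrdef
      have hfold : List.foldl min x (y :: t) = min x mr := by
        simp only [List.foldl_cons]
        exact pv_foldl_min_comm t x y
      rw [hfold, pv_argGo_some (y :: t) mr hmr 1 0 x]
      have hmem : mr ∈ y :: t := PySem.List.min?_mem hmr
      obtain ⟨jr, hjr⟩ := Option.isSome_iff_exists.mp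
        ((PySem.List.index?_isSome_iff (y :: t) mr).mpr hmem)
      by_cases hxm : x ≤ mr
      · rw [min_eq_left hxm, PySem.List.index?_cons_self, if_neg (by omega : ¬ mr < x)]
        simp
      · rw [min_eq_right (by omega : mr ≤ x),
          PySem.List.index?_cons_of_ne _ (by omega : x ≠ mr), if_pos (by omega : mr < x)]
        simp only [hjr, Option.map_some, Option.getD_some]
        omega

-- ===== VERDICT (by name: the statement is the Claim_ definition above) =====
theorem closest_after_steps_spec : Claim_equal_closest_after_steps := by
  intro p v a steps _ hPre
  obtain ⟨hne, hdisj⟩ := hPre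
  unfold Spec_closest_after_steps closest_after_steps closest_after_steps_alt
  by_cases hs : 0 < steps
  · -- steps > 0: simulation equals the closed form
    have hlen : p.length ≤ v.length ∧ p.length ≤ a.length := by
      rcases hdisj with h | h
      · omega
      · exact h
    simp only [if_pos hs, if_neg (by omega : ¬ steps = 0)]
    rw [pv_foldl_const (aStep a)]
    have hlr : (PySem.List.pyRange 0 steps 1).length = steps.toNat := by
      rw [PySem.List.length_pyRange_one]
      omega
    rw [hlr]
    set tn := steps.toNat with htn
    have hsteps : steps = (tn : Int) := by omega
    rw [hsteps]
    obtain ⟨i1, i2, i3, i4⟩ := pv_iterate_spec p v a hlen.1 tn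
    set st := (aStep a)^[tn] (p, v) with hstdef
    have hq : st.1 = (p.zip (v.zip a)).map
        (fun x => x.1 + x.2.1 * (tn : Int) + PySem.Int.floordiv (x.2.2 * (tn : Int) * ((tn : Int) + 1)) 2) := by
      apply List.ext_getElem
      · rw [i1]
        simp
        omega
      · intro i h1 h2
        have hip : i < p.length := by rw [i1] at h1; exact h1
        have hiv : i < v.length := by omega
        have hia : i < a.length := by omega
        rw [← List.getD_eq_getElem st.1 0 h1, i4 i, if_pos hip]
        rw [List.getElem_map, List.getElem_zip, List.getElem_zip]
        simp only
        rw [List.getD_eq_getElem p 0 hip, List.getD_eq_getElem v 0 hiv,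
          List.getD_eq_getElem a 0 hia, pv_floordiv_tri]
    rw [hq]
    set q := (p.zip (v.zip a)).map
        (fun x => x.1 + x.2.1 * (tn : Int) + PySem.Int.floordiv (x.2.2 * (tn : Int) * ((tn : Int) + 1)) 2) with hqdef
    have hlq : q.length = p.length := by
      rw [hqdef]
      simp
      omega
    have hqne : q ≠ [] := by
      intro hnil
      apply hne
      rw [hnil] at hlq
      exact List.eq_nil_of_length_eq_zero hlq.symm
    rw [pv_sliceSum_pyRange (q.map (fun x => |x|))]
    rw [show (q.map (fun x => |x|)).length = q.length from by simp]
    rw [pv_chunk_eq q, pv_altGo_eq_argGo]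
    exact pv_argGo_top (pvChunkS q) (pv_chunkS_ne_nil q hqne)
  · -- steps ≤ 0: no simulation, q = p
    have hnil : PySem.List.pyRange 0 steps 1 = [] := PySem.List.pyRange_one_eq_nil (by omega)
    simp only [hnil, List.foldl_nil, if_neg hs, if_true]
    rw [pv_sliceSum_pyRange (p.map (fun x => |x|))]
    rw [show (p.map (fun x => |x|)).length = p.length from by simp]
    rw [pv_chunk_eq p, pv_altGo_eq_argGo]
    exact pv_argGo_top (pvChunkS p) (pv_chunkS_ne_nil p hne)
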